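-- pv_equiv track=rewrite | github.com/echefcy/dc20 | DC_game/gameRoom.py | slashPattern
-- ===== SOURCE A (Python) =====
-- ROOM_WIDTH = 1024
--
-- WALL_SIZE = 64
--
-- def slashPattern(size=10):
--     mapSize = ROOM_WIDTH//WALL_SIZE
--     ret = [[0 for i in range(mapSize)] for j in range(mapSize)]
--     for row in range((mapSize-size)//2, (mapSize-size)//2+size):
--         for col in range((mapSize-size)//2, (mapSize-size)//2+size):
--             if row + col == mapSize - 1:
--                 ret[row][col] = 1
--     return ret
-- ===== SOURCE B (Python) =====
-- ROOM_WIDTH = 1024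
--
-- WALL_SIZE = 64
--
-- def slashPattern(size=10):
--     mapSize = ROOM_WIDTH // WALL_SIZE
--     lo = (mapSize - size) // 2
--     hi = lo + size
--     ret = [[0] * mapSize for _ in range(mapSize)]
--     for row in range(lo, hi):
--         col = mapSize - 1 - row
--         if lo <= col < hi:
--             ret[row][col] = 1
--     return ret
-- ===== Notes on version B (the rewrite author's own statement) =====
-- stated objective: simpler
-- what changed: B replaces A's O(size^2) nested row/col scan testing row+col==mapSize-1 with a single O(size) loop over rows that computes the anti-diagonal column directly and bounds-checks it.
-- outside the precondition, e.g. on slashPattern(18): A raises IndexError, B raises IndexError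
import Mathlib
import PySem

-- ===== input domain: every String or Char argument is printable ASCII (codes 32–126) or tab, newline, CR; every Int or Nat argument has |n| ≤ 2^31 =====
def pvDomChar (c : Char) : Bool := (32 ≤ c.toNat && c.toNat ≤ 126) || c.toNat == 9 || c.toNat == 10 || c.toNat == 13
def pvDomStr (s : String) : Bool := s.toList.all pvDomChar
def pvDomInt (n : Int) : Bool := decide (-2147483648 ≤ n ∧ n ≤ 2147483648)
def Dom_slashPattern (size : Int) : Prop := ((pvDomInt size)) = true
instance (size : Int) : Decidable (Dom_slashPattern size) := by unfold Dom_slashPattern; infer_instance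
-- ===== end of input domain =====

-- B replaces A's nested row/col scan with a single loop computing the anti-diagonal column directly (simpler).
-- ===== PORT A =====
def slashPattern (size : Int) : List (List Int) :=
  let mapSize : Int := PySem.Int.floordiv 1024 64
  let ret : List (List Int) :=
    (PySem.List.pyRange 0 mapSize 1).map (fun _ =>
      (PySem.List.pyRange 0 mapSize 1).map (fun _ => (0 : Int)))
  (PySem.List.pyRange (PySem.Int.floordiv (mapSize - size) 2)
      (PySem.Int.floordiv (mapSize - size) 2 + size) 1).foldl (fun ret row =>
    (PySem.List.pyRange (PySem.Int.floordiv (mapSize - size) 2)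
        (PySem.Int.floordiv (mapSize - size) 2 + size) 1).foldl (fun ret col =>
      if row + col = mapSize - 1 then
        -- ret[row][col] = 1 ; total setter, in range under Pre_
        PySem.List.pySetD ret row (PySem.List.pySetD (PySem.List.pyGetD ret row []) col 1)
      else ret) ret) ret

-- ===== PORT B =====
def slashPattern_alt (size : Int) : List (List Int) :=
  let mapSize : Int := PySem.Int.floordiv 1024 64
  let lo : Int := PySem.Int.floordiv (mapSize - size) 2
  let hi : Int := lo + size
  let ret : List (List Int) :=
    (PySem.List.pyRange 0 mapSize 1).map (fun _ => List.replicate mapSize.toNat (0 : Int))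
  (PySem.List.pyRange lo hi 1).foldl (fun ret row =>
    let col := mapSize - 1 - row
    if lo ≤ col ∧ col < hi then
      PySem.List.pySetD ret row (PySem.List.pySetD (PySem.List.pyGetD ret row []) col 1)
    else ret) ret

-- ===== PRECONDITION & SPEC =====
-- Pre_ excludes size ≥ 18, on which A raises IndexError (ret[-1][16] with col 16 out of range).
def Pre_slashPattern (size : Int) : Prop := size ≤ 17
instance (size : Int) : Decidable (Pre_slashPattern size) := by unfold Pre_slashPattern; infer_instance
def pvWitness_slashPattern : Int := 10
def Spec_slashPattern (size : Int) (out : List (List Int)) : Prop := out = slashPattern_alt size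
instance (size : Int) (out : List (List Int)) : Decidable (Spec_slashPattern size out) := by unfold Spec_slashPattern; infer_instance

-- ===== CLAIM (what is proved, stated in full; the proofs are below) =====
def Claim_equal_slashPattern : Prop := ∀ (size : Int), Dom_slashPattern size → Pre_slashPattern size → Spec_slashPattern size (slashPattern size)

-- ===== LEMMAS AND PROOFS =====

-- ===== VERDICT (by name: the statement is the Claim_ definition above) =====
set_option maxRecDepth 100000 in
theorem slashPattern_spec : Claim_equal_slashPattern := by
  intro size hdom hpre
  unfold Pre_slashPattern at hpre
  unfold Spec_slashPattern
  by_cases h : size ≤ 0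
  · simp only [slashPattern, slashPattern_alt]
    simp only [PySem.List.pyRange_one_eq_nil
      (show PySem.Int.floordiv (PySem.Int.floordiv 1024 64 - size) 2 + size ≤
          PySem.Int.floordiv (PySem.Int.floordiv 1024 64 - size) 2 by omega),
      List.foldl_nil]
    decide
  · interval_cases size <;> decide
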